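-- pv_equiv track=rewrite | github.com/jakekrol/genefusion | results/2026_04-roc_tumor_and_normal_recurrent_fusions/score_negs_tissue_specific.py | colmap_subset
-- ===== SOURCE A (Python) =====
-- def colmap_subset(colmap_tumor, colmap_normal, tissues, include_1000g=False):
-- 	'''
-- 	goal: select relevant evidence types for a fusion
-- 	colmap_tumor: tumor evidence type dictionary
-- 	colmap_normal: normal evidence type dictionary
-- 	tissues: list of tissues the fusion is recurrent in
-- 	include_1000g: whether to include 1000g evidence
-- 	'''
-- 	colmap_t = {}
-- 	for t in tissues:
-- 		t = t.lower()
-- 		for k, v in colmap_tumor.items():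
-- 			# get tissue of evidence cateogory
-- 			tissue_key = k.split('_')[0].lower()
-- 			if t == tissue_key:
-- 				colmap_t[k] = v
-- 	colmap_n = {}
-- 	for t in tissues:
-- 		t = t.lower()
-- 		for k, v in colmap_normal.items():
-- 			# get tissue of evidence cateogory
-- 			tissue_key = k.split('_')[0].lower()
-- 			if t == tissue_key:
-- 				colmap_n[k] = v
-- 	# optionally add 1000g evidence types
-- 	if include_1000g:
-- 		for k, v in colmap_normal.items():
-- 			if "1000g" in k.lower():
-- 				colmap_n[k] = v
-- 	return colmap_t, colmap_n
-- ===== SOURCE B (Python) =====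
-- def colmap_subset(colmap_tumor, colmap_normal, tissues, include_1000g=False):
--     def pick(colmap):
--         # one pass: bucket entries by their tissue prefix, then emit buckets in tissue order
--         groups = {}
--         for k, v in colmap.items():
--             groups.setdefault(k.split('_')[0].lower(), []).append((k, v))
--         out = {}
--         for t in tissues:
--             for k, v in groups.get(t.lower(), []):
--                 out[k] = v
--         return out
--     colmap_t = pick(colmap_tumor)
--     colmap_n = pick(colmap_normal)
--     if include_1000g:
--         for k, v in colmap_normal.items():
--             if "1000g" in k.lower():
--                 colmap_n[k] = v
--     return colmap_t, colmap_n
-- ===== Notes on version B (the rewrite author's own statement) =====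
-- stated objective: faster
-- what changed: Replaces the tissues-by-entries nested scans with a single grouping pass that buckets each entry by its tissue prefix once, then emits the precomputed bucket for each tissue.
import Mathlib
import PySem

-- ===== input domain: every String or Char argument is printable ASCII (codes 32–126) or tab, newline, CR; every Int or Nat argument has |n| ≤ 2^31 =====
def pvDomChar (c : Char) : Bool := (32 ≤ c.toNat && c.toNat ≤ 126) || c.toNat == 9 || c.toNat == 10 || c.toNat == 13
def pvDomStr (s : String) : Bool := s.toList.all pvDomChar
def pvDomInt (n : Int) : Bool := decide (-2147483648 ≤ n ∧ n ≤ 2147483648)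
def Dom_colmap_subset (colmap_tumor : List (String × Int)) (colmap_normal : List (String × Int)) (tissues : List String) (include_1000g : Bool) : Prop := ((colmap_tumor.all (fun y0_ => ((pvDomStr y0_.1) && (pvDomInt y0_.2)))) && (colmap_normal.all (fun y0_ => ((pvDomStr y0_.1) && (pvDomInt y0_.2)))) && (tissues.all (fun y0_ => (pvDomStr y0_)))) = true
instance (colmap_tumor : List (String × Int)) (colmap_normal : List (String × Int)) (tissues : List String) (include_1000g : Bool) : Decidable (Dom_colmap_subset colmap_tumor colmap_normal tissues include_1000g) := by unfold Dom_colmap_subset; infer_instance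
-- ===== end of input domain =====

-- B replaces the nested tissues×entries scans with one grouping pass per dict (bucket by tissue prefix, then emit buckets per tissue); faster.

-- ===== PORT A =====
-- k.split('_')[0].lower()  (split on a nonempty separator is never empty, so headD "" is exact)
def pvTissueKey (k : String) : String :=
  PySem.Str.lower (((PySem.Str.split? k "_").getD []).headD "")

def colmap_subset (colmap_tumor : List (String × Int)) (colmap_normal : List (String × Int)) (tissues : List String) (include_1000g : Bool) : (List (String × Int)) × (List (String × Int)) :=
  let colmap_t : PySem.Dict String Int :=
    tissues.foldl (fun d t =>
      let tl := PySem.Str.lower t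
      colmap_tumor.foldl (fun d kv =>
        if tl == pvTissueKey kv.1 then d.insert kv.1 kv.2 else d) d)
      PySem.Dict.empty
  let colmap_n : PySem.Dict String Int :=
    tissues.foldl (fun d t =>
      let tl := PySem.Str.lower t
      colmap_normal.foldl (fun d kv =>
        if tl == pvTissueKey kv.1 then d.insert kv.1 kv.2 else d) d)
      PySem.Dict.empty
  let colmap_n :=
    if include_1000g then
      colmap_normal.foldl (fun d kv =>
        if PySem.Str.isIn "1000g" (PySem.Str.lower kv.1) then d.insert kv.1 kv.2 else d) colmap_n
    else colmap_n
  (colmap_t.items, colmap_n.items)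

-- ===== PORT B =====
-- groups.setdefault(key, []).append((k, v))  then  for t in tissues: for (k,v) in groups.get(t.lower(), []): out[k] = v
def pvPick (colmap : List (String × Int)) (tissues : List String) : PySem.Dict String Int :=
  let groups : PySem.Dict String (List (String × Int)) :=
    colmap.foldl (fun g kv => g.modify (pvTissueKey kv.1) [] (fun l => l ++ [kv])) PySem.Dict.empty
  tissues.foldl (fun d t =>
    (groups.getD (PySem.Str.lower t) []).foldl (fun d kv => d.insert kv.1 kv.2) d)
    PySem.Dict.empty

def colmap_subset_alt (colmap_tumor : List (String × Int)) (colmap_normal : List (String × Int)) (tissues : List String) (include_1000g : Bool) : (List (String × Int)) × (List (String × Int)) :=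
  let colmap_t := pvPick colmap_tumor tissues
  let colmap_n := pvPick colmap_normal tissues
  let colmap_n :=
    if include_1000g then
      colmap_normal.foldl (fun d kv =>
        if PySem.Str.isIn "1000g" (PySem.Str.lower kv.1) then d.insert kv.1 kv.2 else d) colmap_n
    else colmap_n
  (colmap_t.items, colmap_n.items)

-- ===== PRECONDITION & SPEC =====
def Spec_colmap_subset (colmap_tumor : List (String × Int)) (colmap_normal : List (String × Int)) (tissues : List String) (include_1000g : Bool) (out : (List (String × Int)) × (List (String × Int))) : Prop := out = colmap_subset_alt colmap_tumor colmap_normal tissues include_1000g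
instance (colmap_tumor : List (String × Int)) (colmap_normal : List (String × Int)) (tissues : List String) (include_1000g : Bool) (out : (List (String × Int)) × (List (String × Int))) : Decidable (Spec_colmap_subset colmap_tumor colmap_normal tissues include_1000g out) := by unfold Spec_colmap_subset; infer_instance

-- ===== CLAIM (what is proved, stated in full; the proofs are below) =====
def Claim_equal_colmap_subset : Prop := ∀ (colmap_tumor : List (String × Int)) (colmap_normal : List (String × Int)) (tissues : List String) (include_1000g : Bool), Dom_colmap_subset colmap_tumor colmap_normal tissues include_1000g → Spec_colmap_subset colmap_tumor colmap_normal tissues include_1000g (colmap_subset colmap_tumor colmap_normal tissues include_1000g)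

-- ===== LEMMAS AND PROOFS =====

-- The grouping dict built by B: looking up t returns exactly the entries of colmap whose tissue key is t.
theorem pvGroups_getD (l : List (String × Int)) (g : PySem.Dict String (List (String × Int))) (t : String) :
    (l.foldl (fun g kv => g.modify (pvTissueKey kv.1) [] (fun l => l ++ [kv])) g).getD t []
      = g.getD t [] ++ l.filter (fun kv => pvTissueKey kv.1 == t) := by
  induction l generalizing g with
  | nil => simp
  | cons kv rest ih =>
    simp only [List.foldl_cons, List.filter_cons, ih]
    by_cases h : pvTissueKey kv.1 = t
    · subst h
      simp [PySem.Dict.getD_modify_self]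
    · rw [PySem.Dict.getD_modify_of_ne _ _ _ (Ne.symm h)]
      simp [h]

-- A's inner scan over colmap for one tissue equals B's fold over that tissue's bucket.
theorem pvInner_eq (colmap : List (String × Int)) (tl : String) (d : PySem.Dict String Int) :
    colmap.foldl (fun d kv => if tl == pvTissueKey kv.1 then d.insert kv.1 kv.2 else d) d
      = ((colmap.foldl (fun g kv => g.modify (pvTissueKey kv.1) [] (fun l => l ++ [kv])) PySem.Dict.empty).getD tl []).foldl
          (fun d kv => d.insert kv.1 kv.2) d := by
  rw [pvGroups_getD]
  simp only [PySem.Dict.getD_empty, List.nil_append]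
  have hp : (fun kv : String × Int => pvTissueKey kv.1 == tl)
      = (fun kv : String × Int => tl == pvTissueKey kv.1) := funext fun kv => by simp [eq_comm]
  rw [hp, List.foldl_filter]

theorem pvPick_eq (colmap : List (String × Int)) (tissues : List String) :
    tissues.foldl (fun d t =>
      let tl := PySem.Str.lower t
      colmap.foldl (fun d kv => if tl == pvTissueKey kv.1 then d.insert kv.1 kv.2 else d) d)
      PySem.Dict.empty = pvPick colmap tissues := by
  unfold pvPick
  apply PySem.List.foldl_congr_mem
  intro d t _
  exact pvInner_eq colmap (PySem.Str.lower t) d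

-- ===== VERDICT (by name: the statement is the Claim_ definition above) =====
theorem colmap_subset_spec : Claim_equal_colmap_subset := by
  intro ct cn ts g _
  unfold Spec_colmap_subset colmap_subset colmap_subset_alt
  rw [pvPick_eq ct ts, pvPick_eq cn ts]
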